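-- pv_equiv track=rewrite | github.com/elizaOS/eliza | plugins/plugin-agent-skills/python/tests/test_integration.py | _count_depth_outside_strings
-- ===== SOURCE A (Python) =====
-- def _count_depth_outside_strings(text: str) -> int:
--     """Count brace/bracket depth ignoring those inside strings."""
--     depth = 0
--     in_string = False
--     string_char = None
--     i = 0
--     while i < len(text):
--         c = text[i]
--         if in_string:
--             if c == "\\" and i + 1 < len(text):
--                 i += 2
--                 continue
--             if c == string_char:
--                 in_string = False
--         else:
--             if c in ('"', "'"):
--                 in_string = True
--                 string_char = c
--             elif c in ("{", "["):
--                 depth += 1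
--             elif c in ("}", "]"):
--                 depth -= 1
--         i += 1
--     return depth
-- ===== SOURCE B (Python) =====
-- def _count_depth_outside_strings(text: str) -> int:
--     """Two-pass: collect chars outside string literals, then net-count openers vs closers."""
--     buf = []
--     in_string = False
--     string_char = None
--     escaped = False
--     for c in text:
--         if in_string:
--             if escaped:
--                 escaped = False
--             elif c == "\\":
--                 escaped = True
--             elif c == string_char:
--                 in_string = False
--         else:
--             if c in ('"', "'"):
--                 in_string = True
--                 string_char = c
--             else:
--                 buf.append(c)
--     return buf.count("{") + buf.count("[") - buf.count("}") - buf.count("]")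
-- ===== Notes on version B (the rewrite author's own statement) =====
-- stated objective: alternative
-- what changed: B splits the work into two passes: a filtering scan with an escaped-flag state machine that collects the characters outside string literals, then four count() calls compute the net depth, instead of A's single index-jumping loop that increments/decrements a running depth per character.
import Mathlib
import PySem

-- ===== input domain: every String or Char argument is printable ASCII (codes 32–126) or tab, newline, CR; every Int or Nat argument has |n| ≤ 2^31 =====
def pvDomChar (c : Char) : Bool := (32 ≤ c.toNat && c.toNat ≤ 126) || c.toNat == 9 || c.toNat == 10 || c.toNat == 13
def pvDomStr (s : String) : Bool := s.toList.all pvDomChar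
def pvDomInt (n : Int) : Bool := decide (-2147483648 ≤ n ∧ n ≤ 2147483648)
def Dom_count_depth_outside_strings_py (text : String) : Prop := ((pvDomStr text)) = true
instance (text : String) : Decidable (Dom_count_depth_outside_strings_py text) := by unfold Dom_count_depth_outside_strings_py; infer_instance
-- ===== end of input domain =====

-- B re-decomposes A's single depth-accumulating loop into a filter pass (outside-string chars, via an escaped flag) followed by four count() calls; alternative decomposition, same cost.


-- ===== PORT A =====
-- A's while-loop with its index-jumping backslash skip, as recursion on the character list.
def pvLoopA : List Char → Bool → Option Char → Int → Int
  | [], _, _, depth => depth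
  | c :: rest, true, sc, depth =>
    if c = '\\' ∧ rest ≠ [] then
      pvLoopA rest.tail true sc depth            -- i += 2; continue
    else if some c = sc then pvLoopA rest false sc depth
    else pvLoopA rest true sc depth
  | c :: rest, false, sc, depth =>
    if c = '"' ∨ c = '\'' then pvLoopA rest true (some c) depth
    else if c = '{' ∨ c = '[' then pvLoopA rest false sc (depth + 1)
    else if c = '}' ∨ c = ']' then pvLoopA rest false sc (depth - 1)
    else pvLoopA rest false sc depth
termination_by l => l.length
decreasing_by all_goals simp [List.length_tail]

def count_depth_outside_strings_py (text : String) : Int :=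
  pvLoopA text.toList false none 0

-- ===== PORT B =====
-- B's first pass: the escaped-flag state machine collecting characters outside string literals.
def pvFilterB : List Char → Bool → Char → Bool → List Char
  | [], _, _, _ => []
  | c :: r, true, sc, esc =>
    if esc then pvFilterB r true sc false
    else if c = '\\' then pvFilterB r true sc true
    else if c = sc then pvFilterB r false sc esc
    else pvFilterB r true sc esc
  | c :: r, false, sc, esc =>
    if c = '"' ∨ c = '\'' then pvFilterB r true c esc
    else c :: pvFilterB r false sc esc

def count_depth_outside_strings_py_alt (text : String) : Int :=
  let buf := pvFilterB text.toList false ' ' false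
  (buf.count '{' : Int) + buf.count '[' - buf.count '}' - buf.count ']'

-- ===== PRECONDITION & SPEC =====
def Spec_count_depth_outside_strings_py (text : String) (out : Int) : Prop := out = count_depth_outside_strings_py_alt text
instance (text : String) (out : Int) : Decidable (Spec_count_depth_outside_strings_py text out) := by unfold Spec_count_depth_outside_strings_py; infer_instance

-- ===== CLAIM (what is proved, stated in full; the proofs are below) =====
def Claim_equal_count_depth_outside_strings_py : Prop := ∀ (text : String), Dom_count_depth_outside_strings_py text → Spec_count_depth_outside_strings_py text (count_depth_outside_strings_py text)

-- ===== LEMMAS AND PROOFS =====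
-- net brace/bracket count of a character list (what B computes from its buffer)
def pvCnt (l : List Char) : Int :=
  (l.count '{' : Int) + l.count '[' - l.count '}' - l.count ']'

theorem pvCnt_nil : pvCnt [] = 0 := rfl

theorem pvCnt_cons (c : Char) (l : List Char) :
    pvCnt (c :: l) =
      (if c = '{' ∨ c = '[' then 1 else if c = '}' ∨ c = ']' then -1 else 0) + pvCnt l := by
  simp only [pvCnt, List.count_cons]
  by_cases h1 : c = '{' <;> by_cases h2 : c = '[' <;> by_cases h3 : c = '}' <;>
    by_cases h4 : c = ']' <;> simp_all <;> omega

-- Joint invariant for the two reachable loop states (outside a string / inside one with a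
-- non-backslash quote character), by strong induction on the remaining input length.
theorem pvMain : ∀ n : Nat, ∀ l : List Char, l.length ≤ n →
    (∀ (scA : Option Char) (scB : Char) (d : Int),
        pvLoopA l false scA d = d + pvCnt (pvFilterB l false scB false)) ∧
    (∀ (sc : Char) (d : Int), sc ≠ '\\' →
        pvLoopA l true (some sc) d = d + pvCnt (pvFilterB l true sc false)) := by
  intro n
  induction n with
  | zero =>
    intro l hl
    have : l = [] := List.length_eq_zero_iff.mp (Nat.le_zero.mp hl)
    subst this
    constructor
    · intro scA scB d; simp [pvLoopA, pvFilterB, pvCnt_nil]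
    · intro sc d _; simp [pvLoopA, pvFilterB, pvCnt_nil]
  | succ n ih =>
    intro l hl
    cases l with
    | nil =>
      constructor
      · intro scA scB d; simp [pvLoopA, pvFilterB, pvCnt_nil]
      · intro sc d _; simp [pvLoopA, pvFilterB, pvCnt_nil]
    | cons c r =>
      have hr : r.length ≤ n := by simpa using Nat.lt_succ_iff.mp (by simpa using hl)
      constructor
      · -- outside a string
        intro scA scB d
        by_cases hq : c = '"' ∨ c = '\''
        · have hnb : c ≠ '\\' := by rcases hq with h | h <;> subst h <;> decide
          have := (ih r hr).2 c d hnb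
          simp [pvLoopA, pvFilterB, hq, this]
        · by_cases ho : c = '{' ∨ c = '['
          · have := (ih r hr).1 scA scB (d + 1)
            simp [pvLoopA, pvFilterB, hq, ho, this, pvCnt_cons]
            ring
          · by_cases hc : c = '}' ∨ c = ']'
            · have := (ih r hr).1 scA scB (d - 1)
              simp [pvLoopA, pvFilterB, hq, ho, hc, this, pvCnt_cons]
              ring
            · have := (ih r hr).1 scA scB d
              simp [pvLoopA, pvFilterB, hq, ho, hc, this, pvCnt_cons]
      · -- inside a string opened by sc ≠ '\\'
        intro sc d hsc
        by_cases hb : c = '\\'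
        · subst hb
          cases r with
          | nil =>
            have hns : ('\\' : Char) ≠ sc := fun h => hsc h.symm
            simp [pvLoopA, pvFilterB, hns, pvCnt_nil]
          | cons x r' =>
            have hr' : r'.length ≤ n := by
              have : r'.length + 1 ≤ n := by simpa using hr
              omega
            have := (ih r' hr').2 sc d hsc
            simp [pvLoopA, pvFilterB, this]
        · by_cases he : c = sc
          · subst he
            have := (ih r hr).1 (some c) c d
            simp [pvLoopA, pvFilterB, hb, this]
          · have hne : some c ≠ some sc := by simpa using he
            have := (ih r hr).2 sc d hsc
            simp [pvLoopA, pvFilterB, hb, he, hne, this]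

-- ===== VERDICT (by name: the statement is the Claim_ definition above) =====
theorem count_depth_outside_strings_py_spec : Claim_equal_count_depth_outside_strings_py := by
  intro text _
  show count_depth_outside_strings_py text = count_depth_outside_strings_py_alt text
  have := (pvMain text.toList.length text.toList le_rfl).1 none ' ' 0
  simpa [count_depth_outside_strings_py, count_depth_outside_strings_py_alt, pvCnt] using this
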